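-- pv_equiv track=rewrite | github.com/LukeL152/U_Helsinki_Courses | mooc-programming-25/part04-37_neighbours_in_list/src/neighbours_in_list.py | longest_series_of_neighbours
-- ===== SOURCE A (Python) =====
-- def longest_series_of_neighbours(int_list):
--     if len(int_list) < 2:
--         return 1  # or 0 depending on MOOC expectations
--
--     longest = 1
--     current = 1
--
--     for i in range(len(int_list) - 1):
--         if abs(int_list[i] - int_list[i + 1]) == 1:
--             current += 1
--         else:
--             if current > longest:
--                 longest = current
--             current = 1
--
--     # Final check after loop
--     if current > longest:
--         longest = current
--
--     return longest
-- ===== SOURCE B (Python) =====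
-- def longest_series_of_neighbours(int_list):
--     # Stage 1: boolean table over adjacent pairs.
--     diffs = [abs(a - b) == 1 for a, b in zip(int_list, int_list[1:])]
--     # Stage 2: group the table into maximal constant runs (key, length).
--     groups = []
--     for d in diffs:
--         if groups and groups[-1][0] == d:
--             groups[-1] = (d, groups[-1][1] + 1)
--         else:
--             groups.append((d, 1))
--     # Longest run of True pairs; 0 if none.
--     best = max((n for k, n in groups if k), default=0)
--     return best + 1 if best > 0 else 1
-- ===== Notes on version B (the rewrite author's own statement) =====
-- stated objective: idiomatic
-- what changed: Replaced A's fused longest/current counter loop by a two-stage table computation: build a boolean adjacency-difference table, run-length-encode it into (key,length) groups, and take max group length over True groups (default 0), returning best+1 or 1.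
import Mathlib
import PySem

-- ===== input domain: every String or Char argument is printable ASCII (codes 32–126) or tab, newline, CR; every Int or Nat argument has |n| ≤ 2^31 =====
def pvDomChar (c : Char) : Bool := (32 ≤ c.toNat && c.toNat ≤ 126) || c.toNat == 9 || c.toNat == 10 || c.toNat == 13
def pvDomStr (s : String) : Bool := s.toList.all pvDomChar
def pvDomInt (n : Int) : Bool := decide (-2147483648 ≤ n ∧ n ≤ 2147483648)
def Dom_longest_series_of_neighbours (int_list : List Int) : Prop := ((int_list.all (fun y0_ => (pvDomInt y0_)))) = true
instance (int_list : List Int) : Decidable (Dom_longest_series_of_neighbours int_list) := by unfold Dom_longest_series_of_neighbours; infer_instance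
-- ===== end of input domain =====

-- B replaces A's fused longest/current counter loop by a two-stage computation
-- (adjacency table, then run-length groups, then max over True groups); same O(n) cost.

-- ===== PORT A =====
-- the for-loop over i in range(len-1) comparing int_list[i] and int_list[i+1],
-- walking the list by adjacent pairs with state (longest, current)
def lsnLoop (longest current : Int) : List Int → Int × Int
  | a :: b :: rest =>
      if |a - b| = 1 then lsnLoop longest (current + 1) (b :: rest)
      else lsnLoop (if current > longest then current else longest) 1 (b :: rest)
  | _ => (longest, current)

def longest_series_of_neighbours (int_list : List Int) : Int :=
  if int_list.length < 2 then 1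
  else
    let p := lsnLoop 1 1 int_list
    if p.2 > p.1 then p.2 else p.1

-- ===== PORT B =====
-- diffs = [abs(a-b)==1 for a,b in zip(int_list, int_list[1:])]
def lsnDiffs (int_list : List Int) : List Bool :=
  (int_list.zip int_list.tail).map (fun p => decide (|p.1 - p.2| = 1))

-- the grouping loop; the accumulator is Source B's `groups` list kept reversed
-- (head = Python's groups[-1]), reversed back after the fold
def lsnGroupStep (gs : List (Bool × Int)) (d : Bool) : List (Bool × Int) :=
  match gs with
  | (k, n) :: rest => if k == d then (d, n + 1) :: rest else (d, 1) :: (k, n) :: rest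
  | [] => [(d, 1)]

-- best = max((n for k, n in groups if k), default=0)
def lsnBest (groups : List (Bool × Int)) : Int :=
  groups.foldl (fun m g => if g.1 then max m g.2 else m) 0

def longest_series_of_neighbours_alt (int_list : List Int) : Int :=
  let diffs := lsnDiffs int_list
  let groups := (diffs.foldl lsnGroupStep []).reverse
  let best := lsnBest groups
  if best > 0 then best + 1 else 1

-- ===== PRECONDITION & SPEC =====
def Spec_longest_series_of_neighbours (int_list : List Int) (out : Int) : Prop := out = longest_series_of_neighbours_alt int_list
instance (int_list : List Int) (out : Int) : Decidable (Spec_longest_series_of_neighbours int_list out) := by unfold Spec_longest_series_of_neighbours; infer_instance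

-- ===== CLAIM (what is proved, stated in full; the proofs are below) =====
def Claim_equal_longest_series_of_neighbours : Prop := ∀ (int_list : List Int), Dom_longest_series_of_neighbours int_list → Spec_longest_series_of_neighbours int_list (longest_series_of_neighbours int_list)

-- ===== LEMMAS AND PROOFS =====

-- length of the leading run of `true`s in a boolean list
def prefT : List Bool → Int
  | [] => 0
  | true :: bs => 1 + prefT bs
  | false :: _ => 0

-- length of the longest run of `true`s
def mrun : List Bool → Int
  | [] => 0
  | true :: bs => max (1 + prefT bs) (mrun bs)
  | false :: bs => mrun bs

theorem prefT_nonneg : ∀ bs, 0 ≤ prefT bs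
  | [] => le_refl 0
  | true :: bs => by have := prefT_nonneg bs; simp [prefT]; omega
  | false :: _ => le_refl 0

theorem mrun_nonneg : ∀ bs, 0 ≤ mrun bs
  | [] => le_refl 0
  | true :: bs => by have := mrun_nonneg bs; simp [mrun]; omega
  | false :: bs => mrun_nonneg bs

theorem prefT_le_mrun : ∀ bs, prefT bs ≤ mrun bs
  | [] => le_refl 0
  | true :: bs => by unfold prefT mrun; omega
  | false :: bs => by have := mrun_nonneg bs; unfold prefT mrun; omega

-- order-independent max over the True groups
def mbo : List (Bool × Int) → Int
  | [] => 0
  | g :: gs => if g.1 then max g.2 (mbo gs) else mbo gs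

theorem mbo_nonneg : ∀ gs, 0 ≤ mbo gs
  | [] => le_refl 0
  | g :: gs => by have := mbo_nonneg gs; unfold mbo; split <;> omega

theorem lsnBest_eq_mbo (gs : List (Bool × Int)) : lsnBest gs = mbo gs := by
  have h : ∀ (l : List (Bool × Int)) (a : Int), 0 ≤ a →
      l.foldl (fun m g => if g.1 then max m g.2 else m) a = max a (mbo l) := by
    intro l
    induction l with
    | nil => intro a ha; simp [mbo]; omega
    | cons g gs ih =>
      intro a ha
      simp only [List.foldl, mbo]
      by_cases hg : g.1
      · simp [hg]; rw [ih _ (by omega)]; omega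
      · simp [hg]; rw [ih _ ha]
  have := h gs 0 (le_refl 0)
  have hm := mbo_nonneg gs
  unfold lsnBest
  omega

theorem mbo_reverse : ∀ gs : List (Bool × Int), mbo gs.reverse = mbo gs := by
  have h : ∀ (l acc : List (Bool × Int)), mbo (l.reverse ++ acc) = max (mbo l) (mbo acc) ⊔ 0 := by
    intro l
    induction l with
    | nil => intro acc; have := mbo_nonneg acc; simp [mbo]; omega
    | cons g gs ih =>
      intro acc
      have h1 := ih ((g :: acc))
      have h2 := ih acc
      have := mbo_nonneg acc
      have := mbo_nonneg gs
      simp only [List.reverse_cons, List.append_assoc, List.singleton_append] at h1 ⊢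
      rw [h1]
      by_cases hg : g.1 <;> simp [mbo, hg] <;> try omega
  intro gs
  have h1 := h gs []
  have := mbo_nonneg gs
  simp [mbo] at h1
  omega

-- core invariant for B's grouping fold, simultaneous over the key of the head group
theorem groupFold_inv : ∀ bs : List Bool,
    (∀ (n : Int) rest, 1 ≤ n →
      mbo (bs.foldl lsnGroupStep ((true, n) :: rest)) = max (mbo rest) (max (n + prefT bs) (mrun bs))) ∧
    (∀ (n : Int) rest,
      mbo (bs.foldl lsnGroupStep ((false, n) :: rest)) = max (mbo rest) (mrun bs)) := by
  intro bs
  induction bs with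
  | nil =>
    constructor
    · intro n rest hn; simp [mbo, prefT, mrun]; omega
    · intro n rest; have := mbo_nonneg rest; have := mrun_nonneg ([] : List Bool); simp [mbo, mrun]; omega
  | cons d bs ih =>
    obtain ⟨ihT, ihF⟩ := ih
    constructor
    · intro n rest hn
      cases d with
      | true =>
        simp only [List.foldl, lsnGroupStep, BEq.rfl, if_pos]
        rw [ihT (n + 1) rest (by omega)]
        simp [prefT, mrun]; omega
      | false =>
        have hstep : lsnGroupStep ((true, n) :: rest) false = (false, 1) :: (true, n) :: rest := by
          simp [lsnGroupStep]
        simp only [List.foldl, hstep]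
        rw [ihF 1 ((true, n) :: rest)]
        have := mbo_nonneg rest
        have := mrun_nonneg bs
        simp [mbo, prefT, mrun]; omega
    · intro n rest
      cases d with
      | true =>
        have hstep : lsnGroupStep ((false, n) :: rest) true = (true, 1) :: (false, n) :: rest := by
          simp [lsnGroupStep]
        simp only [List.foldl, hstep]
        rw [ihT 1 ((false, n) :: rest) (le_refl 1)]
        simp [mbo, mrun]
      | false =>
        simp only [List.foldl, lsnGroupStep, BEq.rfl, if_pos]
        rw [ihF (n + 1) rest]
        simp [mrun]

-- B computes 1 + (longest True-run of its diffs table)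
theorem alt_eq_mrun (xs : List Int) :
    longest_series_of_neighbours_alt xs = 1 + mrun (lsnDiffs xs) := by
  unfold longest_series_of_neighbours_alt
  have hbest : lsnBest ((lsnDiffs xs).foldl lsnGroupStep []).reverse = mrun (lsnDiffs xs) := by
    rw [lsnBest_eq_mbo, mbo_reverse]
    cases h : lsnDiffs xs with
    | nil => simp [mbo, mrun]
    | cons d bs =>
      cases d with
      | true =>
        have := (groupFold_inv bs).1 1 [] (le_refl 1)
        have hp := prefT_nonneg bs
        have hmb := mrun_nonneg bs
        simp only [List.foldl, lsnGroupStep, mbo, mrun] at *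
        omega
      | false =>
        have := (groupFold_inv bs).2 1 []
        have hmb := mrun_nonneg bs
        simp only [List.foldl, lsnGroupStep, mbo, mrun] at *
        omega
  simp only [hbest]
  have := mrun_nonneg (lsnDiffs xs)
  split <;> omega

theorem lsnDiffs_cons (a b : Int) (rest : List Int) :
    lsnDiffs (a :: b :: rest) = decide (|a - b| = 1) :: lsnDiffs (b :: rest) := by
  simp [lsnDiffs]

-- invariant of A's loop, phrased against prefT/mrun of the diffs table
theorem lsnLoop_inv : ∀ (xs : List Int) (l c : Int), 1 ≤ c →
    (let p := lsnLoop l c xs; if p.2 > p.1 then p.2 else p.1)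
      = max l (max (c + prefT (lsnDiffs xs)) (1 + mrun (lsnDiffs xs))) := by
  intro xs
  induction xs with
  | nil => intro l c hc; simp [lsnLoop, lsnDiffs, prefT, mrun]; omega
  | cons a t ih =>
    cases t with
    | nil => intro l c hc; simp [lsnLoop, lsnDiffs, prefT, mrun]; omega
    | cons b rest =>
      intro l c hc
      rw [lsnDiffs_cons]
      by_cases hd : |a - b| = 1
      · simp only [lsnLoop, if_pos hd]
        rw [ih l (c + 1) (by omega)]
        simp [hd, prefT, mrun]; omega
      · simp only [lsnLoop, if_neg hd]
        rw [ih _ 1 (le_refl 1)]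
        have h1 := prefT_le_mrun (lsnDiffs (b :: rest))
        have h2 := mrun_nonneg (lsnDiffs (b :: rest))
        simp [hd, prefT, mrun]; split <;> try omega

theorem lsnDiffs_short (xs : List Int) (h : xs.length < 2) : lsnDiffs xs = [] := by
  match xs, h with
  | [], _ => rfl
  | [a], _ => rfl

-- ===== VERDICT (by name: the statement is the Claim_ definition above) =====
theorem longest_series_of_neighbours_spec : Claim_equal_longest_series_of_neighbours := by
  intro xs _
  unfold Spec_longest_series_of_neighbours
  rw [alt_eq_mrun]
  unfold longest_series_of_neighbours
  by_cases h : xs.length < 2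
  · rw [if_pos h, lsnDiffs_short xs h]; simp [mrun]
  · rw [if_neg h]
    have := lsnLoop_inv xs 1 1 (le_refl 1)
    have h1 := prefT_le_mrun (lsnDiffs xs)
    have h2 := mrun_nonneg (lsnDiffs xs)
    simp only at this ⊢
    omega
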